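-- pv_equiv track=rewrite | github.com/issacchowdary/cp_practice | cf_1060_2/A_Notelook.py | min_protections
-- ===== SOURCE A (Python) =====
-- def min_protections(n, k, s):
--     ans=0
--     j=0
--     flag=True
--     for i in range(n):
--         if s[i]=='1' and flag==False:
--             if i-j>k-1:
--                 ans+=1
--                 j=i
--             else:
--                 j=i
--         elif s[i]=='1' and flag==True:
--             ans+=1
--             flag=False
--             j=i
--
--     return ans
-- ===== SOURCE B (Python) =====
-- def min_protections(n, k, s):
--     positions = [i for i in range(n) if s[i] == '1']
--     if not positions:
--         return 0
--     return 1 + sum(1 for prev, cur in zip(positions, positions[1:]) if cur - prev >= k)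
-- ===== Notes on version B (the rewrite author's own statement) =====
-- stated objective: simpler
-- what changed: Replaces the single stateful flag/last-index scan by building the list of '1' positions and counting consecutive gaps >= k over zipped pairs.
import Mathlib
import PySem

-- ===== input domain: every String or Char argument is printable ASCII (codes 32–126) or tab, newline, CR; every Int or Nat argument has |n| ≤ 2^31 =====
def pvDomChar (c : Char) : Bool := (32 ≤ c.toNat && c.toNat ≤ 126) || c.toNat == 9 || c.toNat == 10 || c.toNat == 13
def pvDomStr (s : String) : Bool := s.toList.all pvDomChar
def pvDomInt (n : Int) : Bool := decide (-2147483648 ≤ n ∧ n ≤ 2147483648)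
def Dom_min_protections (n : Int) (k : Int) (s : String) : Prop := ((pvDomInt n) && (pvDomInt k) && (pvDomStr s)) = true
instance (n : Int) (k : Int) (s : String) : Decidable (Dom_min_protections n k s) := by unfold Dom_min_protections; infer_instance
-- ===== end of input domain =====

-- B builds the list of '1' positions and counts consecutive gaps ≥ k, replacing A's stateful flag/last-index scan (objective: simpler decomposition).

-- ===== PORT A =====
-- A's loop state: (ans, j, flag)
def pvStepA (k : Int) (s : String) (st : Int × Int × Bool) (i : Int) : Int × Int × Bool :=
  if PySem.Str.pyGet? s i = some '1' ∧ st.2.2 = false then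
    if i - st.2.1 > k - 1 then (st.1 + 1, i, st.2.2) else (st.1, i, st.2.2)
  else if PySem.Str.pyGet? s i = some '1' ∧ st.2.2 = true then
    (st.1 + 1, i, false)
  else st

def min_protections (n : Int) (k : Int) (s : String) : Int :=
  ((PySem.List.pyRange 0 n 1).foldl (pvStepA k s) (0, 0, true)).1

-- ===== PORT B =====
def min_protections_alt (n : Int) (k : Int) (s : String) : Int :=
  let positions := (PySem.List.pyRange 0 n 1).filter (fun i => PySem.Str.pyGet? s i == some '1')
  if positions = [] then 0
  else 1 + (((positions.zip positions.tail).filter (fun p => p.2 - p.1 ≥ k)).length : Int)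

-- ===== PRECONDITION & SPEC =====
-- Pre_ excludes exactly the inputs where A raises IndexError: n exceeding the string length.
def Pre_min_protections (n : Int) (k : Int) (s : String) : Prop := n ≤ (s.toList.length : Int)
instance (n : Int) (k : Int) (s : String) : Decidable (Pre_min_protections n k s) := by unfold Pre_min_protections; infer_instance
def pvWitness_min_protections : Int × Int × String := (5, 2, "10100")

def Spec_min_protections (n : Int) (k : Int) (s : String) (out : Int) : Prop := out = min_protections_alt n k s
instance (n : Int) (k : Int) (s : String) (out : Int) : Decidable (Spec_min_protections n k s out) := by unfold Spec_min_protections; infer_instance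

-- ===== CLAIM (what is proved, stated in full; the proofs are below) =====
def Claim_equal_min_protections : Prop := ∀ (n : Int) (k : Int) (s : String), Dom_min_protections n k s → Pre_min_protections n k s → Spec_min_protections n k s (min_protections n k s)

-- ===== LEMMAS AND PROOFS =====

-- the step A performs at a '1' position (flag/ans/j behaviour made explicit)
def pvStepOne (k : Int) (st : Int × Int × Bool) (i : Int) : Int × Int × Bool :=
  if st.2.2 then (st.1 + 1, i, false)
  else if i - st.2.1 > k - 1 then (st.1 + 1, i, false) else (st.1, i, false)

lemma pvStepA_one (k : Int) (s : String) (st : Int × Int × Bool) (i : Int)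
    (h : PySem.Str.pyGet? s i = some '1') : pvStepA k s st i = pvStepOne k st i := by
  rcases st with ⟨a, j, f⟩
  have h' : PySem.List.pyGet? s.toList i = some '1' := by simpa [PySem.Str.pyGet?] using h
  cases f <;> simp [pvStepA, pvStepOne, h']

lemma pvStepA_other (k : Int) (s : String) (st : Int × Int × Bool) (i : Int)
    (h : ¬ PySem.Str.pyGet? s i = some '1') : pvStepA k s st i = st := by
  have h' : ¬ PySem.List.pyGet? s.toList i = some '1' := by simpa [PySem.Str.pyGet?] using h
  simp [pvStepA, h']

lemma pvFoldA_filter (k : Int) (s : String) (l : List Int) (st : Int × Int × Bool) :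
    l.foldl (pvStepA k s) st
      = (l.filter (fun i => PySem.Str.pyGet? s i == some '1')).foldl (pvStepOne k) st := by
  induction l generalizing st with
  | nil => rfl
  | cons x xs ih =>
    by_cases h : PySem.Str.pyGet? s x = some '1'
    · simp only [List.foldl_cons, List.filter_cons, beq_iff_eq, h, if_pos]
      rw [pvStepA_one k s st x h]
      simpa using ih (pvStepOne k st x)
    · simp only [List.foldl_cons, List.filter_cons, beq_iff_eq, h]
      rw [pvStepA_other k s st x h]
      exact ih st

lemma pvFoldOne_count (k : Int) (l : List Int) (a j : Int) :
    (l.foldl (pvStepOne k) (a, j, false)).1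
      = a + (((j :: l).zip l).filter (fun p => p.2 - p.1 ≥ k)).length := by
  induction l generalizing a j with
  | nil => simp
  | cons q rest ih =>
    have hstep : pvStepOne k (a, j, false) q
        = (if q - j > k - 1 then a + 1 else a, q, false) := by
      simp [pvStepOne]; split <;> simp
    simp only [List.foldl_cons, hstep]
    rw [ih]
    simp only [List.zip_cons_cons, List.filter_cons]
    by_cases hq : q - j ≥ k
    · have h1 : q - j > k - 1 := by omega
      simp only [hq, h1, decide_true, if_pos, List.length_cons]
      push_cast
      ring
    · have h1 : ¬ (q - j > k - 1) := by omega
      simp [hq, h1]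

-- ===== VERDICT (by name: the statement is the Claim_ definition above) =====
theorem min_protections_spec : Claim_equal_min_protections := by
  intro n k s _ _
  unfold Spec_min_protections min_protections min_protections_alt
  rw [pvFoldA_filter]
  cases hp : (PySem.List.pyRange 0 n 1).filter (fun i => PySem.Str.pyGet? s i == some '1') with
  | nil => simp
  | cons p rest =>
    have h1 : pvStepOne k (0, 0, true) p = (1, p, false) := by simp [pvStepOne]
    simp only [List.foldl_cons, h1]
    rw [pvFoldOne_count]
    simp
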